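-- pv_equiv track=rewrite | github.com/Wulfic/Cicada3301 | LiberPrimus/tools/word_boundary_analysis.py | decrypt_words
-- ===== SOURCE A (Python) =====
-- def decrypt_words(words, key):
--     """
--     Decrypt each word separately, maintaining word boundaries.
--     Key position is tracked continuously across words.
--     """
--     decrypted_words = []
--     key_pos = 0
--
--     for word in words:
--         decrypted_word = []
--         for idx in word:
--             k = key[key_pos % len(key)]
--             decrypted_word.append((idx - k) % 29)
--             key_pos += 1
--         decrypted_words.append(decrypted_word)
--
--     return decrypted_words
-- ===== SOURCE B (Python) =====
-- def decrypt_words(words, key):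
--     # Flatten/single-pass/regroup decomposition: record word lengths while
--     # flattening in one iteration, decrypt the flat stream in one linear pass,
--     # then cut it back into words by the saved lengths.
--     lengths = []
--     flat = []
--     for word in words:
--         n = 0
--         for idx in word:
--             flat.append(idx)
--             n += 1
--         lengths.append(n)
--     klen = len(key)
--     dec = [(v - key[i % klen]) % 29 for i, v in enumerate(flat)]
--     out = []
--     pos = 0
--     for n in lengths:
--         out.append(dec[pos:pos + n])
--         pos += n
--     return out
-- ===== Notes on version B (the rewrite author's own statement) =====
-- stated objective: alternative
-- what changed: Replaces A's nested loops with a running key counter by a three-stage decomposition: one pass flattening the words while recording their lengths, one linear enumerated pass decrypting the flat list, then regrouping the flat result into words by the saved lengths.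
import Mathlib
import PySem

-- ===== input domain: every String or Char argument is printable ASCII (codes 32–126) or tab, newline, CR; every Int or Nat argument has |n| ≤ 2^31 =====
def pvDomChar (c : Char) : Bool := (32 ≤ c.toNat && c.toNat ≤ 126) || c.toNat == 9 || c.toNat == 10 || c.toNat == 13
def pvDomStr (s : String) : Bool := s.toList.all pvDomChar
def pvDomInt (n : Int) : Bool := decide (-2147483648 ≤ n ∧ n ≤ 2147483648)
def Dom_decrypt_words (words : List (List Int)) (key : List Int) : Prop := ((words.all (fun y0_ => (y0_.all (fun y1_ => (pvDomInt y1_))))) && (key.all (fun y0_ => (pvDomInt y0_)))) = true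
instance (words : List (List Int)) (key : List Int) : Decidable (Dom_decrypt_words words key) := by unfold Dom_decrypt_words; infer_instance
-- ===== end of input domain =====

-- B replaces A's nested loops with a flatten / single linear decrypt pass / regroup-by-lengths decomposition (alternative structure, same cost; return-value equivalence).


-- ===== PORT A =====
-- A: per word, per element: (idx - key[key_pos % len(key)]) % 29, key_pos running continuously.
def stepA (key : List Int) (st : List (List Int) × Int) (word : List Int) : List (List Int) × Int :=
  let r := word.foldl (fun (s : List Int × Int) idx =>
    let k := (PySem.List.pyGet? key (PySem.Int.mod s.2 (key.length : Int))).getD 0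
    (s.1 ++ [PySem.Int.mod (idx - k) 29], s.2 + 1)) (([] : List Int), st.2)
  (st.1 ++ [r.1], r.2)

def decrypt_words (words : List (List Int)) (key : List Int) : List (List Int) :=
  (words.foldl (stepA key) (([] : List (List Int)), (0 : Int))).1

-- ===== PORT B =====
-- B: flatten words recording lengths, decrypt the flat list in one enumerated pass, regroup by slices.
def flatStepB (st : List Int × List Int) (word : List Int) : List Int × List Int :=
  let r := word.foldl (fun (s : List Int × Int) idx => (s.1 ++ [idx], s.2 + 1)) (st.2, (0 : Int))
  (st.1 ++ [r.2], r.1)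

def decElem (key : List Int) (klen : Int) (p : Int × Int) : Int :=
  PySem.Int.mod (p.2 - (PySem.List.pyGet? key (PySem.Int.mod p.1 klen)).getD 0) 29

def regroupStepB (dec : List Int) (o : List (List Int) × Int) (n : Int) : List (List Int) × Int :=
  (o.1 ++ [PySem.List.slice dec (some o.2) (some (o.2 + n))], o.2 + n)

def decrypt_words_alt (words : List (List Int)) (key : List Int) : List (List Int) :=
  let lf := words.foldl flatStepB (([] : List Int), ([] : List Int))
  let klen : Int := key.length
  let dec := (PySem.List.enumerate lf.2 0).map (decElem key klen)
  (lf.1.foldl (regroupStepB dec) (([] : List (List Int)), (0 : Int))).1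

-- ===== PRECONDITION & SPEC =====
-- Pre_ excludes exactly the inputs where Python A raises ZeroDivisionError: key empty while some word has an element.
def Pre_decrypt_words (words : List (List Int)) (key : List Int) : Prop :=
  key ≠ [] ∨ ∀ w ∈ words, w = []
instance (words : List (List Int)) (key : List Int) : Decidable (Pre_decrypt_words words key) := by unfold Pre_decrypt_words; infer_instance
def pvWitness_decrypt_words : List (List Int) × List Int := ([[1, 2], [], [30, -3]], [5, 7])

def Spec_decrypt_words (words : List (List Int)) (key : List Int) (out : List (List Int)) : Prop := out = decrypt_words_alt words key
instance (words : List (List Int)) (key : List Int) (out : List (List Int)) : Decidable (Spec_decrypt_words words key out) := by unfold Spec_decrypt_words; infer_instance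

-- ===== CLAIM (what is proved, stated in full; the proofs are below) =====
def Claim_equal_decrypt_words : Prop := ∀ (words : List (List Int)) (key : List Int), Dom_decrypt_words words key → Pre_decrypt_words words key → Spec_decrypt_words words key (decrypt_words words key)

-- ===== LEMMAS AND PROOFS =====

-- reference result: word-by-word decryption with explicit start position
def gRef (key : List Int) : List (List Int) → Int → List (List Int)
  | [], _ => []
  | w :: ws, s => (PySem.List.enumerate w s).map (decElem key (key.length : Int)) :: gRef key ws (s + w.length)

theorem A_inner (key : List Int) (w : List Int) (acc : List Int) (s : Int) :
    w.foldl (fun (st : List Int × Int) idx =>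
      let k := (PySem.List.pyGet? key (PySem.Int.mod st.2 (key.length : Int))).getD 0
      (st.1 ++ [PySem.Int.mod (idx - k) 29], st.2 + 1)) (acc, s)
    = (acc ++ (PySem.List.enumerate w s).map (decElem key (key.length : Int)), s + w.length) := by
  induction w generalizing acc s with
  | nil => simp [PySem.List.enumerate]
  | cons x xs ih =>
      simp only [List.foldl_cons, PySem.List.enumerate_cons, List.map_cons, ih, decElem]
      rw [Prod.mk.injEq]
      refine ⟨by simp, by push_cast [List.length_cons]; ring⟩

theorem stepA_eq (key : List Int) (st : List (List Int) × Int) (word : List Int) :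
    stepA key st word
    = (st.1 ++ [(PySem.List.enumerate word st.2).map (decElem key (key.length : Int))], st.2 + word.length) := by
  simp only [stepA, A_inner]
  simp

theorem A_outer (key : List Int) (ws : List (List Int)) (acc : List (List Int)) (s : Int) :
    (ws.foldl (stepA key) (acc, s)).1 = acc ++ gRef key ws s := by
  induction ws generalizing acc s with
  | nil => simp [gRef]
  | cons w ws ih =>
      rw [List.foldl_cons, stepA_eq, ih, gRef]
      simp

theorem B_inner (w : List Int) (F : List Int) (n : Int) :
    w.foldl (fun (s : List Int × Int) idx => (s.1 ++ [idx], s.2 + 1)) (F, n)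
    = (F ++ w, n + w.length) := by
  induction w generalizing F n with
  | nil => simp
  | cons x xs ih =>
      simp only [List.foldl_cons, ih]
      rw [Prod.mk.injEq]
      refine ⟨by simp, by push_cast [List.length_cons]; ring⟩

theorem flatStepB_eq (st : List Int × List Int) (word : List Int) :
    flatStepB st word = (st.1 ++ [(word.length : Int)], st.2 ++ word) := by
  simp only [flatStepB, B_inner]
  rw [Prod.mk.injEq]
  refine ⟨by simp, by simp⟩

theorem B_lf (ws : List (List Int)) (L : List Int) (F : List Int) :
    ws.foldl flatStepB (L, F) = (L ++ ws.map (fun w => (w.length : Int)), F ++ ws.flatten) := by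
  induction ws generalizing L F with
  | nil => simp
  | cons w ws ih =>
      rw [List.foldl_cons, flatStepB_eq, ih]
      simp

theorem slice_dec (key : List Int) (pre w rest : List Int) :
    PySem.List.slice ((PySem.List.enumerate (pre ++ (w ++ rest)) 0).map (decElem key (key.length : Int)))
        (some (pre.length : Int)) (some ((pre.length : Int) + (w.length : Int)))
    = (PySem.List.enumerate w (pre.length : Int)).map (decElem key (key.length : Int)) := by
  rw [PySem.List.slice_natCast_add]
  rw [PySem.List.enumerate_append, PySem.List.enumerate_append]
  simp only [List.map_append]
  rw [List.drop_append_of_le_length (by simp [PySem.List.length_enumerate])]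
  rw [List.drop_of_length_le (by simp [PySem.List.length_enumerate])]
  simp only [List.nil_append, Int.zero_add]
  rw [List.take_append_of_le_length (by simp [PySem.List.length_enumerate])]
  rw [List.take_of_length_le (by simp [PySem.List.length_enumerate])]

theorem B_regroup (key : List Int) (ws : List (List Int)) (pre : List Int) (acc : List (List Int)) :
    ((ws.map (fun w => (w.length : Int))).foldl
        (regroupStepB ((PySem.List.enumerate (pre ++ ws.flatten) 0).map (decElem key (key.length : Int))))
        (acc, (pre.length : Int))).1
    = acc ++ gRef key ws (pre.length : Int) := by
  induction ws generalizing pre acc with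
  | nil => simp [gRef]
  | cons w ws ih =>
      rw [List.map_cons, List.foldl_cons, gRef]
      simp only [regroupStepB, List.flatten_cons]
      rw [slice_dec key pre w ws.flatten]
      have h1 : ((pre.length : Int) + (w.length : Int)) = (((pre ++ w).length : Nat) : Int) := by
        simp
      have h2 : pre ++ (w ++ ws.flatten) = (pre ++ w) ++ ws.flatten := by
        simp [List.append_assoc]
      rw [h1, h2, ih (pre ++ w)]
      rw [← h1]
      simp

-- ===== VERDICT (by name: the statement is the Claim_ definition above) =====
theorem decrypt_words_spec : Claim_equal_decrypt_words := by
  intro words key _ _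
  show decrypt_words words key = decrypt_words_alt words key
  simp only [decrypt_words, decrypt_words_alt]
  rw [A_outer key words [] 0, B_lf words [] []]
  simp only [List.nil_append]
  have h := B_regroup key words [] []
  simp only [List.length_nil, Nat.cast_zero, List.nil_append] at h
  rw [h]
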